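-- pv_equiv track=rewrite | github.com/DeltaMod/LDI | LDI/LDI_Data_Processing.py | Determine_Gridsize
-- ===== SOURCE A (Python) =====
-- def Determine_Gridsize(xgrid,ygrid):
--     def Count_Repeated(grid):
--         num = 0
--         orig = grid[0]
--         for p in grid:
--             if p != orig:
--                 break
--             num += 1
--         return(num)
--
--     def Count_Until_Repeat(grid):
--         num = 1
--         orig = grid[0]
--         for p in grid[1:]:
--             if p == orig:
--                 break
--             num += 1
--         return(num)
--     xnum = [Count_Repeated(xgrid),Count_Until_Repeat(xgrid)]
--     ynum = [Count_Repeated(ygrid),Count_Until_Repeat(ygrid)]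
--     return({'xg':max(xnum),'yg':max(ynum)})
-- ===== SOURCE B (Python) =====
-- def Determine_Gridsize(xgrid, ygrid):
--     # Single scan with a parity flag: the answer for a grid is the first index
--     # i >= 1 where (grid[i] == grid[0]) differs from (grid[1] == grid[0]),
--     # else len(grid); no run/recurrence counters and no max needed.
--     def gridsize(grid):
--         orig = grid[0]
--         n = len(grid)
--         if n == 1:
--             return 1
--         flip = grid[1] == orig
--         for i in range(1, n):
--             if (grid[i] == orig) != flip:
--                 return i
--         return n
--     return {'xg': gridsize(xgrid), 'yg': gridsize(ygrid)}
-- ===== Notes on version B (the rewrite author's own statement) =====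
-- stated objective: alternative
-- what changed: Per grid, one scan with a parity flag replaces A's two counting loops plus max: the answer is the first index i>=1 where (grid[i]==grid[0]) differs from (grid[1]==grid[0]), else len(grid); no run/recurrence counters and no max are computed.
import Mathlib
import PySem

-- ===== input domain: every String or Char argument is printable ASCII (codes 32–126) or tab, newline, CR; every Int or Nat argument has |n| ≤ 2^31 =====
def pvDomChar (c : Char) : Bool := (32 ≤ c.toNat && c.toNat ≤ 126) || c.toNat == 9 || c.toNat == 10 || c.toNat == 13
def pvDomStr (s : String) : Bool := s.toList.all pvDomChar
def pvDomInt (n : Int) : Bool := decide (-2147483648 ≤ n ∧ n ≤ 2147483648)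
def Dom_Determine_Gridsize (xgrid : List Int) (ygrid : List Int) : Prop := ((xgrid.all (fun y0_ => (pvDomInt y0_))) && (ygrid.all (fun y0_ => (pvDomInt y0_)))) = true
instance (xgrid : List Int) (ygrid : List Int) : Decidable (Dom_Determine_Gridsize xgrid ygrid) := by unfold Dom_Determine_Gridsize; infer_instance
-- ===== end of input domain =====

-- B replaces A's two counting loops + max per grid by ONE scan with a parity flag
-- taken from grid[1]; objective: alternative (same O(n) cost, no counters, no max).

-- ===== PORT A =====
-- for p in grid: if p != orig: break; num += 1   (break ⇒ stop, return num so far)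
def pvA_crLoop (orig : Int) : List Int → Int
  | [] => 0
  | p :: t => if p ≠ orig then 0 else 1 + pvA_crLoop orig t

def pvA_Count_Repeated (grid : List Int) : Int :=
  match PySem.List.pyGet? grid 0 with
  | none => 0          -- IndexError in Python; excluded by Pre_
  | some orig => pvA_crLoop orig grid

-- for p in grid[1:]: if p == orig: break; num += 1   (num starts at 1)
def pvA_curLoop (orig : Int) : List Int → Int
  | [] => 0
  | p :: t => if p = orig then 0 else 1 + pvA_curLoop orig t

def pvA_Count_Until_Repeat (grid : List Int) : Int :=
  match PySem.List.pyGet? grid 0 with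
  | none => 0          -- IndexError in Python; excluded by Pre_
  | some orig => 1 + pvA_curLoop orig grid.tail   -- grid[1:]

def Determine_Gridsize (xgrid : List Int) (ygrid : List Int) : List (String × Int) :=
  let xnum := [pvA_Count_Repeated xgrid, pvA_Count_Until_Repeat xgrid]
  let ynum := [pvA_Count_Repeated ygrid, pvA_Count_Until_Repeat ygrid]
  [("xg", max (xnum[0]!) (xnum[1]!)), ("yg", max (ynum[0]!) (ynum[1]!))]

-- ===== PORT B =====
-- for i in range(1, n): if (grid[i] == orig) != flip: return i;  return n
-- (the elements grid[1], …, grid[n-1] are exactly grid.tail, walked with index i)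
def pvB_scan (orig : Int) (flip : Bool) (n : Int) : List Int → Int → Int
  | [], _ => n
  | p :: t, i => if ((p == orig) != flip) then i else pvB_scan orig flip n t (i + 1)

def pvB_gridsize (grid : List Int) : Int :=
  match PySem.List.pyGet? grid 0 with
  | none => 0          -- IndexError in Python; excluded by Pre_
  | some orig =>
    let n : Int := grid.length
    if n = 1 then 1
    else
      let flip := PySem.List.pyGet? grid 1 == some orig   -- grid[1] == orig
      pvB_scan orig flip n grid.tail 1

def Determine_Gridsize_alt (xgrid : List Int) (ygrid : List Int) : List (String × Int) :=
  [("xg", pvB_gridsize xgrid), ("yg", pvB_gridsize ygrid)]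

-- ===== PRECONDITION & SPEC =====
-- A evaluates grid[0] on both grids: on an empty xgrid or ygrid Python raises IndexError.
def Pre_Determine_Gridsize (xgrid : List Int) (ygrid : List Int) : Prop :=
  xgrid ≠ [] ∧ ygrid ≠ []
instance (xgrid : List Int) (ygrid : List Int) : Decidable (Pre_Determine_Gridsize xgrid ygrid) := by
  unfold Pre_Determine_Gridsize; infer_instance

def pvWitness_Determine_Gridsize : List Int × List Int := ([1, 1, 2], [3, 4, 3])

def Spec_Determine_Gridsize (xgrid : List Int) (ygrid : List Int) (out : List (String × Int)) : Prop := out = Determine_Gridsize_alt xgrid ygrid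
instance (xgrid : List Int) (ygrid : List Int) (out : List (String × Int)) : Decidable (Spec_Determine_Gridsize xgrid ygrid out) := by unfold Spec_Determine_Gridsize; infer_instance

-- ===== CLAIM (what is proved, stated in full; the proofs are below) =====
def Claim_equal_Determine_Gridsize : Prop := ∀ (xgrid : List Int) (ygrid : List Int), Dom_Determine_Gridsize xgrid ygrid → Pre_Determine_Gridsize xgrid ygrid → Spec_Determine_Gridsize xgrid ygrid (Determine_Gridsize xgrid ygrid)

-- ===== LEMMAS AND PROOFS =====

theorem pvA_crLoop_nonneg (orig : Int) (t : List Int) : 0 ≤ pvA_crLoop orig t := by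
  induction t with
  | nil => simp [pvA_crLoop]
  | cons p t ih => simp only [pvA_crLoop]; split <;> omega

theorem pvA_curLoop_nonneg (orig : Int) (t : List Int) : 0 ≤ pvA_curLoop orig t := by
  induction t with
  | nil => simp [pvA_curLoop]
  | cons p t ih => simp only [pvA_curLoop]; split <;> omega

-- B's scan with flip = true finds the first index with element ≠ orig ↦ A's Count_Repeated loop
theorem pvB_scan_true (orig : Int) (t : List Int) (i : Int) :
    pvB_scan orig true (i + (t.length : Int)) t i = i + pvA_crLoop orig t := by
  induction t generalizing i with
  | nil => simp [pvB_scan, pvA_crLoop]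
  | cons p t ih =>
    simp only [pvB_scan, pvA_crLoop]
    by_cases h : p = orig
    · simp only [h, BEq.rfl, Bool.true_bne, Bool.not_true, Bool.false_eq_true, if_false,
        ne_eq, not_true_eq_false]
      have := ih (i + 1)
      simp only [List.length_cons]
      push_cast
      rw [show i + ((t.length : Int) + 1) = (i + 1) + (t.length : Int) by ring, this]; ring
    · simp [h, bne]

-- B's scan with flip = false finds the first index with element = orig ↦ A's Count_Until_Repeat loop
theorem pvB_scan_false (orig : Int) (t : List Int) (i : Int) :
    pvB_scan orig false (i + (t.length : Int)) t i = i + pvA_curLoop orig t := by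
  induction t generalizing i with
  | nil => simp [pvB_scan, pvA_curLoop]
  | cons p t ih =>
    simp only [pvB_scan, pvA_curLoop]
    by_cases h : p = orig
    · simp [h]
    · simp only [h, if_false]
      have hb : ((p == orig) != false) = false := by
        simp [bne, h]
      rw [hb]
      simp only [Bool.false_eq_true, if_false]
      have := ih (i + 1)
      simp only [List.length_cons]
      push_cast
      rw [show i + ((t.length : Int) + 1) = (i + 1) + (t.length : Int) by ring, this]; ring

theorem pvB_gridsize_eq (grid : List Int) (h : grid ≠ []) :
    max (pvA_Count_Repeated grid) (pvA_Count_Until_Repeat grid) = pvB_gridsize grid := by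
  obtain ⟨o, t, rfl⟩ : ∃ o t, grid = o :: t := by
    cases grid with
    | nil => exact absurd rfl h
    | cons a b => exact ⟨a, b, rfl⟩
  have hget : PySem.List.pyGet? (o :: t) 0 = some o := by
    simp [PySem.List.pyGet?, PySem.List.pyIdx?]
  simp only [pvA_Count_Repeated, pvA_Count_Until_Repeat, pvB_gridsize, hget, List.tail_cons]
  have hCR : pvA_crLoop o (o :: t) = 1 + pvA_crLoop o t := by simp [pvA_crLoop]
  rw [hCR]
  cases t with
  | nil =>
    simp [pvA_crLoop, pvA_curLoop]
  | cons q t' =>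
    have hn1 : ((o :: q :: t').length : Int) ≠ 1 := by
      simp only [List.length_cons]; push_cast; omega
    rw [if_neg hn1]
    have hget1 : PySem.List.pyGet? (o :: q :: t') 1 = some q := by
      simp [PySem.List.pyGet?, PySem.List.pyIdx?]
    rw [hget1]
    have hlen : ((o :: q :: t').length : Int) = 1 + ((q :: t').length : Int) := by
      simp only [List.length_cons]; push_cast; ring
    by_cases hq : q = o
    · -- flip = true: scan = 1 + crLoop; and curLoop (q::t') = 0 since q = o
      have hflip : (some q == some o) = true := by simp [hq]
      rw [hflip, hlen, pvB_scan_true]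
      have : pvA_curLoop o (q :: t') = 0 := by simp [pvA_curLoop, hq]
      rw [this]
      have := pvA_crLoop_nonneg o (q :: t')
      omega
    · -- flip = false: scan = 1 + curLoop; and crLoop (q::t') = 0 since q ≠ o
      have hflip : (some q == some o) = false := by simp [hq]
      rw [hflip, hlen, pvB_scan_false]
      have : pvA_crLoop o (q :: t') = 0 := by simp [pvA_crLoop, hq]
      rw [this]
      have := pvA_curLoop_nonneg o (q :: t')
      omega

-- ===== VERDICT (by name: the statement is the Claim_ definition above) =====
theorem Determine_Gridsize_spec : Claim_equal_Determine_Gridsize := by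
  intro xgrid ygrid _ hpre
  unfold Spec_Determine_Gridsize Determine_Gridsize Determine_Gridsize_alt
  simp only [List.getElem!_cons_zero, List.getElem!_cons_succ]
  rw [pvB_gridsize_eq xgrid hpre.1, pvB_gridsize_eq ygrid hpre.2]
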